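-- pv_equiv track=rewrite | github.com/ElshadaiK/Competitive-Programming | 629-k-inverse-pairs-array/629-k-inverse-pairs-array.py | kInversePairs
-- ===== SOURCE A (Python) =====
-- def kInversePairs(n: int, k: int) -> int:
--     MOD = pow(10,9) + 7
--
--     max_possible_inversions = (n * (n-1)//2)
--     if k > max_possible_inversions:
--         return 0
--     if k == 0 or k == max_possible_inversions:
--         return 1
--
--     dp = [[0]*(k+1) for _ in range(n+1)]
--
--     for i in range(1, n+1):
--         dp[i][0] = 1
--
--     dp[2][1] = 1
--
--     for i in range(3,n+1):
--         max_possible_inversions = min(k, i*(i-1)//2)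
--         for j in range(1,  max_possible_inversions + 1):
--             dp[i][j] = dp[i][j-1] + dp[i-1][j]
--             if j>=i:
--                 dp[i][j] -= dp[i-1][j - i]
--             dp[i][j] = (dp[i][j] + MOD) % MOD
--
--     return dp[n][k]
-- ===== SOURCE B (Python) =====
-- def kInversePairs(n: int, k: int) -> int:
--     MOD = 10**9 + 7
--     if k > n * (n - 1) // 2:
--         return 0
--     dp = [1] + [0] * k  # dp[j] = number of arrays of current length with j inverse pairs, mod MOD
--     for i in range(1, n + 1):
--         new = []
--         for j in range(k + 1):
--             s = 0
--             for p in range(min(j, i - 1) + 1):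
--                 s += dp[j - p]
--             new.append(s % MOD)
--         dp = new
--     return dp[k]
-- ===== Notes on version B (the rewrite author's own statement) =====
-- stated objective: simpler
-- what changed: Replaces A's sliding-window 2D DP table with hard-coded early returns and seeded rows by the plain inner-sum recurrence dp'[j] = sum_{p<=min(j,i-1)} dp[j-p] mod 1e9+7 on a single rolling row (keeping only the k > n(n-1)/2 -> 0 size guard).
-- intended difference: On negative n with k = n*(n-1)//2, A's early boundary return accidentally yields 1; B returns 0, the intended count since no array of negative length has k > 0 inverse pairs. — e.g. on kInversePairs(-1, 1): A returns 1, B returns 0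
import Mathlib
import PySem

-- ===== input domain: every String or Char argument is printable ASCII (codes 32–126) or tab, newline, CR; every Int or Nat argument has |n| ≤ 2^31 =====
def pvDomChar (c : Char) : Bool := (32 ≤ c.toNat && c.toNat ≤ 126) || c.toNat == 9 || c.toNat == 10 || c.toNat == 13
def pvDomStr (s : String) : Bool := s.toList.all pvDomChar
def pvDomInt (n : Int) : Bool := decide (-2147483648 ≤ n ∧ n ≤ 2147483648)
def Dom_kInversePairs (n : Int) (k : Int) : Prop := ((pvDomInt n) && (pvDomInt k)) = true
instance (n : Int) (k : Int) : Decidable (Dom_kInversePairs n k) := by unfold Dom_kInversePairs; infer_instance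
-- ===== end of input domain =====

-- B replaces A's sliding-window 2D DP (with its special-cased early returns) by the plain
-- O(n·k·min(n,k)) inner-sum recurrence on a single rolling row; same return values on Pre_,
-- except the D_ corner below (negative n) where B's 0 is the intended count.

-- ===== PORT A =====
-- dp[i][j] read/write helpers: exact for the nonnegative in-range indices that occur on Pre_
-- (Python would raise on out-of-range access; Pre_ excludes those runs).
def pvGetA (dp : List (List Int)) (i j : Int) : Int := (dp.getD i.toNat []).getD j.toNat 0
def pvSetA (dp : List (List Int)) (i j : Int) (v : Int) : List (List Int) :=
  dp.set i.toNat ((dp.getD i.toNat []).set j.toNat v)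

def kInversePairs (n : Int) (k : Int) : Int :=
  let M : Int := 1000000007
  let maxInv := PySem.Int.floordiv (n * (n - 1)) 2
  if k > maxInv then 0
  else if k = 0 ∨ k = maxInv then 1
  else
    let dp : List (List Int) := (PySem.List.pyRange 0 (n + 1) 1).map (fun _ => List.replicate (k + 1).toNat 0)
    let dp := (PySem.List.pyRange 1 (n + 1) 1).foldl (fun dp i => pvSetA dp i 0 1) dp
    let dp := pvSetA dp 2 1 1
    let dp := (PySem.List.pyRange 3 (n + 1) 1).foldl (fun dp i =>
        (PySem.List.pyRange 1 (min k (PySem.Int.floordiv (i * (i - 1)) 2) + 1) 1).foldl (fun dp j =>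
          let v := pvGetA dp i (j - 1) + pvGetA dp (i - 1) j
          let v := if j ≥ i then v - pvGetA dp (i - 1) (j - i) else v
          pvSetA dp i j (PySem.Int.mod (v + M) M)) dp) dp
    pvGetA dp n k

-- ===== PORT B =====
-- Python lists are ported as Array (O(1) indexing, like Python); indices in B are
-- nonnegative and in range on Pre_, so Array.getD with .toNat is exact there
def kInversePairs_alt (n : Int) (k : Int) : Int :=
  let M : Int := 1000000007
  if k > PySem.Int.floordiv (n * (n - 1)) 2 then 0 else
  let dp0 : Array Int := #[1] ++ Array.replicate k.toNat 0
  let dp := (PySem.List.pyRange 1 (n + 1) 1).foldl (fun dp i =>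
      (PySem.List.pyRange 0 (k + 1) 1).foldl (fun new j =>
        new.push (PySem.Int.mod ((PySem.List.pyRange 0 (min j (i - 1) + 1) 1).foldl
            (fun s p => s + dp.getD (j - p).toNat 0) 0) M)) #[]) dp0
  dp.getD k.toNat 0

-- ===== PRECONDITION & SPEC =====
-- Pre_ excludes exactly the inputs where A raises IndexError: k < 0 (the dp rows get
-- nonpositive width), and n < 0 with 0 < k < n*(n-1)//2 (the dp table is empty but indexed).
def Pre_kInversePairs (n : Int) (k : Int) : Prop :=
  0 ≤ k ∧ (0 ≤ n ∨ k = 0 ∨ n * (n - 1) ≤ 2 * k)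
instance (n : Int) (k : Int) : Decidable (Pre_kInversePairs n k) := by unfold Pre_kInversePairs; infer_instance
def pvWitness_kInversePairs : Int × Int := (4, 3)

-- On negative n with k = n*(n-1)//2, A's early boundary return accidentally yields 1;
-- B returns 0, the intended count of arrays of negative length with k > 0 inverse pairs.
def D_kInversePairs (n : Int) (k : Int) : Prop :=
  n < 0 ∧ 2 * k = n * (n - 1)
instance (n : Int) (k : Int) : Decidable (D_kInversePairs n k) := by unfold D_kInversePairs; infer_instance

def Spec_kInversePairs (n : Int) (k : Int) (out : Int) : Prop :=
  ¬ D_kInversePairs n k → out = kInversePairs_alt n k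
instance (n : Int) (k : Int) (out : Int) : Decidable (Spec_kInversePairs n k out) := by unfold Spec_kInversePairs; infer_instance

def pvDiffWitness_kInversePairs : Int × Int := (-1, 1)
def pvDiffWitnessOut_kInversePairs : Int × Int := (1, 0)

-- ===== CLAIM (what is proved, stated in full; the proofs are below) =====
def Claim_unchanged_kInversePairs : Prop := ∀ (n : Int) (k : Int), Dom_kInversePairs n k → Pre_kInversePairs n k → Spec_kInversePairs n k (kInversePairs n k)
def Claim_changed_kInversePairs : Prop := Dom_kInversePairs (pvDiffWitness_kInversePairs.1) (pvDiffWitness_kInversePairs.2) ∧ Pre_kInversePairs (pvDiffWitness_kInversePairs.1) (pvDiffWitness_kInversePairs.2) ∧ D_kInversePairs (pvDiffWitness_kInversePairs.1) (pvDiffWitness_kInversePairs.2) ∧ kInversePairs (pvDiffWitness_kInversePairs.1) (pvDiffWitness_kInversePairs.2) = pvDiffWitnessOut_kInversePairs.1 ∧ kInversePairs_alt (pvDiffWitness_kInversePairs.1) (pvDiffWitness_kInversePairs.2) = pvDiffWitnessOut_kInversePairs.2 ∧ pvDiffWitnessOut_kInversePairs.1 ≠ pvDiffWitnessOut_kIn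versePairs.2
def Claim_exact_kInversePairs : Prop := ∀ (n : Int) (k : Int), Dom_kInversePairs n k → Pre_kInversePairs n k → D_kInversePairs n k → kInversePairs n k ≠ kInversePairs_alt n k

-- ===== LEMMAS AND PROOFS =====

-- n*(n-1) is even, so Python's floor division by 2 is exact
theorem pv_two_mul_floordiv (n : Int) : 2 * PySem.Int.floordiv (n * (n - 1)) 2 = n * (n - 1) := by
  rw [PySem.Int.floordiv_eq_ediv_of_pos (by norm_num)]
  refine Int.mul_ediv_cancel' ?_
  have h : n * (n - 1) = (n - 1) * ((n - 1) + 1) := by ring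
  rw [h]
  exact (Int.even_mul_succ_self (n - 1)).two_dvd

-- the exact number of arrays of [1..i] with j inverse pairs (as an integer)
def pvC : ℕ → ℕ → Int
  | 0, j => if j = 0 then 1 else 0
  | i + 1, j => ∑ p ∈ Finset.range (min j i + 1), pvC i (j - p)

theorem pvC_zero_right : ∀ i, pvC i 0 = 1 := by
  intro i; induction i with
  | zero => simp [pvC]
  | succ i ih => simp [pvC, ih]

theorem pv_nat_even_half (t : ℕ) : 2 * ((t + 1) * t / 2) = (t + 1) * t := by
  obtain ⟨m, hm⟩ := Nat.even_mul_succ_self t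
  have e : (t + 1) * t = t * (t + 1) := by ring
  omega

theorem pvC_eq_zero : ∀ i j, i * (i - 1) < 2 * j → pvC i j = 0 := by
  intro i; induction i with
  | zero => intro j h; simp only [pvC]; omega
  | succ i ih =>
    intro j h
    simp only [pvC]
    refine Finset.sum_eq_zero (fun p hp => ?_)
    simp only [Finset.mem_range] at hp
    rcases i with _ | m
    · have hp0 : p = 0 := by omega
      subst hp0
      simp only [pvC]
      omega
    · refine ih (j - p) ?_
      have q1 : (m + 1 + 1) * (m + 1 + 1 - 1) = (m + 1) * m + 2 * (m + 1) := by
        simp only [Nat.add_sub_cancel]; ring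
      have q2 : (m + 1) * (m + 1 - 1) = (m + 1) * m := by simp
      omega

theorem pvC_max : ∀ i, pvC i (i * (i - 1) / 2) = 1 := by
  intro i; induction i with
  | zero => simp [pvC]
  | succ i ih =>
    have hhalf1 : 2 * ((i + 1) * i / 2) = (i + 1) * i := pv_nat_even_half i
    have hhalf2 : 2 * (i * (i - 1) / 2) = i * (i - 1) := by
      rcases i with _ | m
      · simp
      · have := pv_nat_even_half m
        have e : (m + 1) * (m + 1 - 1) = (m + 1) * m := by simp
        have e2 : (m + 1) * m = m * (m + 1) := by ring
        obtain ⟨w, hw⟩ := Nat.even_mul_succ_self m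
        omega
    have hj : (i + 1) * ((i + 1) - 1) / 2 = (i + 1) * i / 2 := by simp
    have hq : i * i + i = (i + 1) * i := by ring
    rw [hj]
    simp only [pvC]
    have hmin : min ((i + 1) * i / 2) i = i := by
      have hsq : i ≤ i * i := by
        rcases i with _ | m
        · simp
        · exact Nat.le_mul_of_pos_left _ (by omega)
      omega
    rw [hmin, Finset.sum_range_succ]
    have hlast : (i + 1) * i / 2 - i = i * (i - 1) / 2 := by
      have q2 : i * (i - 1) + 2 * i = (i + 1) * i ∨ i = 0 := by
        rcases i with _ | m
        · right; rfl
        · left; simp only [Nat.add_sub_cancel]; ring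
      rcases q2 with q2 | q2
      · omega
      · subst q2; simp
    rw [hlast, ih]
    have hzero : ∑ p ∈ Finset.range i, pvC i ((i + 1) * i / 2 - p) = 0 := by
      refine Finset.sum_eq_zero (fun p hp => ?_)
      simp only [Finset.mem_range] at hp
      refine pvC_eq_zero i _ ?_
      have q2 : i * (i - 1) + 2 * i = (i + 1) * i ∨ i = 0 := by
        rcases i with _ | m
        · right; rfl
        · left; simp only [Nat.add_sub_cancel]; ring
      rcases q2 with q2 | q2 <;> omega
    rw [hzero]; ring

-- the sliding-window recurrence satisfied by pvC
theorem pvC_rec (i j : ℕ) (hi : 1 ≤ i) (hj : 1 ≤ j) :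
    pvC i j = pvC i (j - 1) + pvC (i - 1) j - (if i ≤ j then pvC (i - 1) (j - i) else 0) := by
  rcases i with _ | i'
  · omega
  rcases j with _ | j'
  · omega
  simp only [Nat.add_sub_cancel, pvC]
  by_cases hc : i' ≤ j'
  · have hmin1 : min (j' + 1) i' = i' := by omega
    have hmin2 : min j' i' = i' := by omega
    rw [hmin1, hmin2, Finset.sum_range_succ' (fun p => pvC i' (j' + 1 - p)) i',
        Finset.sum_range_succ (fun p => pvC i' (j' - p)) i']
    have he : ∀ p, j' + 1 - (p + 1) = j' - p := fun p => by omega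
    simp only [he, Nat.sub_zero, if_pos (by omega : i' + 1 ≤ j' + 1)]
    ring
  · have hmin1 : min (j' + 1) i' = j' + 1 := by omega
    have hmin2 : min j' i' = j' := by omega
    rw [hmin1, hmin2, Finset.sum_range_succ' (fun p => pvC i' (j' + 1 - p)) (j' + 1),
        Finset.sum_range_succ (fun p => pvC i' (j' - p)) j']
    have he : ∀ p, j' + 1 - (p + 1) = j' - p := fun p => by omega
    simp only [he, Nat.sub_zero, if_neg (by omega : ¬ (i' + 1 ≤ j' + 1))]
    rw [Finset.sum_range_succ (fun x => pvC i' (j' - x)) j']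
    ring

theorem pv_maxInv_pos (n : Int) (hn : n < 0) : 1 ≤ PySem.Int.floordiv (n * (n - 1)) 2 := by
  have h2 := pv_two_mul_floordiv n
  have hp : 0 < (-n) * (1 - n) := mul_pos (by omega) (by omega)
  have he : (-n) * (1 - n) = n * (n - 1) := by ring
  omega

-- ---- B characterization ----

-- the row B maintains: counts of the current length t, reduced mod 1e9+7
def pvRow (K t : ℕ) : List Int := (List.range (K + 1)).map (fun j => pvC t j % 1000000007)

theorem pv_foldl_sum (m : ℕ) (f : ℕ → Int) :
    (List.range m).foldl (fun s p => s + f p) 0 = ∑ p ∈ Finset.range m, f p := by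
  rw [PySem.List.foldl_add, zero_add]
  exact Int.neg_inj.mp rfl

theorem B_dp0 (K : ℕ) : (1 : Int) :: List.replicate K 0 = pvRow K 0 := by
  rw [show pvRow K 0 = (List.range (K + 1)).map (fun j => pvC 0 j % 1000000007) from rfl]
  rw [List.range_succ_eq_map, List.map_cons, List.map_map]
  refine congrArg₂ List.cons (by simp [pvC]) ?_
  symm
  rw [List.eq_replicate_iff]
  refine ⟨by simp, fun b hb => ?_⟩
  obtain ⟨j, _, rfl⟩ := List.mem_map.mp hb
  simp [pvC]

theorem B_step (K t : ℕ) :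
    (PySem.List.pyRange 0 ((K : Int) + 1) 1).map (fun j =>
      PySem.Int.mod ((PySem.List.pyRange 0 (min j (((t : Int) + 1) - 1) + 1) 1).foldl
          (fun s p => s + (pvRow K t).getD (j - p).toNat 0) 0) 1000000007) = pvRow K (t + 1) := by
  rw [show ((K : Int) + 1) = ((K + 1 : ℕ) : Int) by push_cast; ring]
  rw [PySem.List.pyRange_zero_natCast (K + 1), List.map_map]
  rw [show pvRow K (t + 1) = (List.range (K + 1)).map (fun j => pvC (t + 1) j % 1000000007) from rfl]
  refine List.map_congr_left (fun j hj => ?_)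
  rw [List.mem_range] at hj
  simp only [Function.comp]
  have e0 : ((t : Int) + 1) - 1 = (t : Int) := by ring
  have e1 : min ((j : ℕ) : Int) ((t : Int)) = ((min j t : ℕ) : Int) := (Nat.cast_min j t).symm
  rw [e0, e1, show ((min j t : ℕ) : Int) + 1 = ((min j t + 1 : ℕ) : Int) by push_cast; ring]
  rw [PySem.List.pyRange_zero_natCast (min j t + 1), List.foldl_map]
  rw [pv_foldl_sum (min j t + 1) (fun p => (pvRow K t).getD (((j : ℕ) : Int) - (p : Int)).toNat 0)]
  have e2 : ∀ p ∈ Finset.range (min j t + 1),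
      (pvRow K t).getD (((j : ℕ) : Int) - (p : Int)).toNat 0 = pvC t (j - p) % 1000000007 := by
    intro p hp
    rw [Finset.mem_range] at hp
    have : (((j : ℕ) : Int) - (p : Int)).toNat = j - p := by omega
    rw [this]
    exact PySem.List.getD_map_range (fun j => pvC t j % 1000000007) (K + 1) (j - p) 0 (by omega)
  rw [Finset.sum_congr rfl e2, PySem.Int.mod_eq_emod_of_pos (by norm_num), ← Finset.sum_int_mod]
  congr 1

theorem pv_arr_getD (a : Array Int) (i : ℕ) : a.getD i 0 = a.toList.getD i 0 := by
  simp [Array.getD, List.getD]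
  split
  · rename_i h
    rw [Array.getElem?_eq_getElem h]
    rfl
  · rename_i h
    rw [Array.getElem?_eq_none (by omega)]
    rfl

theorem pv_foldl_push {β : Type} (l : List β) (g : β → Int) (a : Array Int) :
    l.foldl (fun acc x => acc.push (g x)) a = a ++ (l.map g).toArray := by
  induction l generalizing a with
  | nil => simp
  | cons h t ih => simp [ih]

theorem B_loop (K : ℕ) : ∀ (N : ℕ),
    (PySem.List.pyRange 1 ((N : Int) + 1) 1).foldl (fun dp i =>
      (PySem.List.pyRange 0 ((K : Int) + 1) 1).foldl (fun new j =>
        new.push (PySem.Int.mod ((PySem.List.pyRange 0 (min j (i - 1) + 1) 1).foldl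
            (fun s p => s + dp.getD (j - p).toNat 0) 0) 1000000007)) #[]) (pvRow K 0).toArray
      = (pvRow K N).toArray := by
  intro N; induction N with
  | zero => simp [PySem.List.pyRange_one_eq_nil]
  | succ N ih =>
    rw [show ((N + 1 : ℕ) : Int) + 1 = (((N : Int) + 1) + 1) by push_cast; ring]
    rw [PySem.List.pyRange_one_succ_right (a := 1) (b := (N : Int) + 1) (by omega), List.foldl_append]
    rw [ih]
    simp only [List.foldl_cons, List.foldl_nil]
    simp only [pv_arr_getD]
    rw [pv_foldl_push]
    rw [show ∀ a : Array Int, #[] ++ a = a from by intro a; simp]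
    exact congrArg List.toArray (B_step K N)

theorem B_val (n k : Int) (hn : 0 ≤ n) (hk : 0 ≤ k) :
    kInversePairs_alt n k = pvC n.toNat k.toNat % 1000000007 := by
  obtain ⟨N, rfl⟩ := Int.eq_ofNat_of_zero_le hn
  obtain ⟨K, rfl⟩ := Int.eq_ofNat_of_zero_le hk
  unfold kInversePairs_alt
  simp only [Int.toNat_natCast]
  have hNN : ((N : Int)) * ((N : Int) - 1) = ((N * (N - 1) : ℕ) : Int) := by
    rcases N with _ | m
    · simp
    · push_cast [Nat.cast_sub (by omega : 1 ≤ m + 1)]; ring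
  rw [hNN, show ((2 : Int)) = ((2 : ℕ) : Int) from rfl, PySem.Int.floordiv_natCast]
  by_cases hg : ((K : ℕ) : Int) > ((N * (N - 1) / 2 : ℕ) : Int)
  · rw [if_pos hg]
    have hev : 2 * (N * (N - 1) / 2) = N * (N - 1) := by
      rcases N with _ | m
      · simp
      · have e : (m + 1) * (m + 1 - 1) = (m + 1) * m := by simp
        have e2 : (m + 1) * m = m * (m + 1) := by ring
        obtain ⟨w, hw⟩ := Nat.even_mul_succ_self m
        omega
    rw [pvC_eq_zero N K (by omega)]
    decide
  rw [if_neg hg]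
  rw [show (#[(1 : Int)] ++ Array.replicate K 0) = (pvRow K 0).toArray from
        Array.ext' (by simp [(B_dp0 K).symm])]
  rw [B_loop K N, pv_arr_getD, List.toList_toArray]
  exact PySem.List.getD_map_range (fun j => pvC N j % 1000000007) (K + 1) K 0 (by omega)

theorem B_neg (n k : Int) (hn : n < 0) (hk : 0 ≤ k) :
    kInversePairs_alt n k = if k = 0 then 1 else 0 := by
  unfold kInversePairs_alt
  by_cases hg : k > PySem.Int.floordiv (n * (n - 1)) 2
  · rw [if_pos hg]
    have := pv_maxInv_pos n hn
    rw [if_neg (by omega : ¬ k = 0)]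
  rw [if_neg hg]
  rw [PySem.List.pyRange_one_eq_nil (a := 1) (b := n + 1) (by omega)]
  simp only [List.foldl_nil]
  rw [pv_arr_getD]
  simp only [Array.toList_append, Array.toList_replicate]
  by_cases h : k = 0
  · subst h; simp
  · rw [if_neg h, show k.toNat = (k.toNat - 1) + 1 from by omega]
    simp [List.getD]

-- ---- A characterization ----

theorem pvC_one (j : ℕ) : pvC 1 j = if j = 0 then 1 else 0 := by
  show pvC 1 j = _
  simp only [pvC, Nat.min_zero]
  rw [show (0 + 1) = 1 from rfl, Finset.sum_range_one, Nat.sub_zero]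

theorem pvC_two (j : ℕ) : pvC 2 j = if j = 0 ∨ j = 1 then 1 else 0 := by
  rcases j with _ | _ | m
  · decide
  · decide
  · show pvC 2 (m + 2) = _
    simp only [pvC]
    rw [show min (m + 2) 1 = 1 from by omega, Finset.sum_range_succ, Finset.sum_range_one]
    simp only [Nat.min_zero]
    norm_num [Finset.sum_range_one]

-- the state predicate: shape of A's dp table plus its pointwise content F
def pvSt (N K : ℕ) (F : ℕ → ℕ → Int) (dp : List (List Int)) : Prop :=
  dp.length = N + 1 ∧ (∀ a : ℕ, (dp.getD a []).length = if a ≤ N then K + 1 else 0) ∧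
  (∀ i j : ℕ, pvGetA dp (i : Int) (j : Int) = F i j)

theorem pvSt_congr {N K : ℕ} {F G : ℕ → ℕ → Int} {dp : List (List Int)}
    (h : pvSt N K F dp) (hFG : ∀ i j, F i j = G i j) : pvSt N K G dp :=
  ⟨h.1, h.2.1, fun i j => (h.2.2 i j).trans (hFG i j)⟩

theorem pvSt_set {N K : ℕ} {F : ℕ → ℕ → Int} {dp : List (List Int)} (h : pvSt N K F dp)
    (i j : ℕ) (hi : i ≤ N) (hj : j ≤ K) (v : Int) :
    pvSt N K (fun i' j' => if i' = i ∧ j' = j then v else F i' j') (pvSetA dp (i : Int) (j : Int) v) := by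
  obtain ⟨hlen, hrow, hval⟩ := h
  have hiN : i < dp.length := by omega
  have hjK : j < (dp.getD i []).length := by rw [hrow i, if_pos hi]; omega
  refine ⟨by simp [pvSetA, hlen], ?_, ?_⟩
  · intro a
    simp only [pvSetA, Int.toNat_natCast]
    rw [List.getD_eq_getElem?_getD, List.getElem?_set]
    by_cases heq : i = a
    · rw [if_pos heq, if_pos hiN, Option.getD_some, List.length_set, ← heq, hrow i]
    · rw [if_neg heq, ← List.getD_eq_getElem?_getD, hrow a]
  · intro i' j'
    simp only [pvGetA, pvSetA, Int.toNat_natCast]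
    rw [List.getD_eq_getElem?_getD (l := dp.set i ((dp.getD i []).set j v)) (i := i'), List.getElem?_set]
    by_cases hii : i = i'
    · rw [if_pos hii, if_pos hiN, Option.getD_some,
          List.getD_eq_getElem?_getD (l := (dp.getD i []).set j v) (i := j'), List.getElem?_set]
      by_cases hjj : j = j'
      · rw [if_pos hjj, if_pos hjK, Option.getD_some, if_pos ⟨hii.symm, hjj.symm⟩]
      · rw [if_neg hjj, if_neg (by tauto), ← List.getD_eq_getElem?_getD]
        have := hval i' j'
        simp only [pvGetA, Int.toNat_natCast] at this
        rw [hii]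
        exact this
    · rw [if_neg hii, if_neg (by tauto), ← List.getD_eq_getElem?_getD]
      have := hval i' j'
      simp only [pvGetA, Int.toNat_natCast] at this
      exact this

-- content of an untouched row (1 written at column 0 by the first loop)
def pvBase (j : ℕ) : Int := if j = 0 then 1 else 0

-- content after the outer loop has processed rows 3..t
def pvF4 (N K t : ℕ) (i j : ℕ) : Int :=
  if 1 ≤ i ∧ i ≤ N ∧ j ≤ K then
    (if i ≤ t then pvC i j % 1000000007 else pvBase j) else 0

theorem pv_getD_repl (m t : ℕ) : (List.replicate m (0 : Int)).getD t 0 = 0 := by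
  rw [List.getD_eq_getElem?_getD, List.getElem?_replicate]
  split <;> rfl

theorem A_init (N K : ℕ) :
    pvSt N K (fun _ _ => 0)
      ((PySem.List.pyRange 0 ((N : Int) + 1) 1).map (fun _ => List.replicate ((K : Int) + 1).toNat (0 : Int))) := by
  have hlen : ((PySem.List.pyRange 0 ((N : Int) + 1) 1).map
      (fun _ => List.replicate ((K : Int) + 1).toNat (0 : Int))).length = N + 1 := by
    rw [List.length_map, PySem.List.length_pyRange_one]; omega
  have hKn : ((K : Int) + 1).toNat = K + 1 := by omega
  have hget : ∀ a : ℕ, ((PySem.List.pyRange 0 ((N : Int) + 1) 1).map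
      (fun _ => List.replicate ((K : Int) + 1).toNat (0 : Int))).getD a [] =
      if a ≤ N then List.replicate (K + 1) 0 else [] := by
    intro a
    rw [List.getD_eq_getElem?_getD, List.getElem?_map]
    by_cases ha : a ≤ N
    · rw [List.getElem?_eq_getElem (by rw [PySem.List.length_pyRange_one]; omega)]
      simp [hKn, ha]
    · rw [List.getElem?_eq_none (by rw [PySem.List.length_pyRange_one]; omega)]
      simp [ha]
  refine ⟨hlen, ?_, ?_⟩
  · intro a
    rw [hget a]
    split <;> simp
  · intro i j
    unfold pvGetA
    simp only [Int.toNat_natCast]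
    rw [hget i]
    split
    · exact pv_getD_repl _ _
    · rfl

theorem A_stage2 (N K : ℕ) (dp0 : List (List Int)) (h0 : pvSt N K (fun _ _ => 0) dp0) :
    ∀ t : ℕ, t ≤ N →
    pvSt N K (fun i j => if 1 ≤ i ∧ i ≤ t ∧ j = 0 then 1 else 0)
      ((PySem.List.pyRange 1 ((t : Int) + 1) 1).foldl (fun dp i => pvSetA dp i 0 1) dp0) := by
  intro t; induction t with
  | zero =>
    intro _
    simp only [Nat.cast_zero]
    rw [PySem.List.pyRange_one_eq_nil (a := 1) (b := (0 : Int) + 1) (by omega)]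
    exact pvSt_congr h0 (by intro i j; split_ifs <;> omega)
  | succ t ih =>
    intro ht
    rw [show (((t + 1 : ℕ) : Int) + 1) = (((t : Int) + 1) + 1) from by push_cast; ring]
    rw [PySem.List.pyRange_one_succ_right (a := 1) (b := (t : Int) + 1) (by omega), List.foldl_append]
    simp only [List.foldl_cons, List.foldl_nil]
    have hstep := pvSt_set (ih (by omega)) (t + 1) 0 (by omega) (by omega) 1
    push_cast at hstep
    refine pvSt_congr hstep ?_
    intro i j
    split_ifs <;> omega

-- row r of A's table while its inner loop has filled columns 1..s
def pvG (N K r s : ℕ) (i j : ℕ) : Int :=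
  if 1 ≤ i ∧ i ≤ N ∧ j ≤ K then
    (if i < r then pvC i j % 1000000007
     else if i = r ∧ j ≤ s then pvC r j % 1000000007 else pvBase j) else 0

theorem A_row_step (N K r s : ℕ) (h3 : 3 ≤ r) (hrN : r ≤ N) (hsK : s + 1 ≤ K)
    (dpP : List (List Int)) (hP : pvSt N K (pvG N K r s) dpP) :
    pvSt N K (pvG N K r (s + 1))
      ((fun dp j =>
          let v := pvGetA dp (r : Int) (j - 1) + pvGetA dp ((r : Int) - 1) j
          let v := if j ≥ (r : Int) then v - pvGetA dp ((r : Int) - 1) (j - (r : Int)) else v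
          pvSetA dp (r : Int) j (PySem.Int.mod (v + 1000000007) 1000000007)) dpP ((s : Int) + 1)) := by
  simp only
  rw [show ((s : Int) + 1) - 1 = ((s : ℕ) : Int) from by ring]
  rw [show ((r : Int) - 1) = ((r - 1 : ℕ) : Int) from by omega]
  rw [show ((s : Int) + 1) = ((s + 1 : ℕ) : Int) from by omega]
  have hv1 : pvGetA dpP (r : Int) (s : Int) = pvC r s % 1000000007 := by
    rw [hP.2.2 r s]
    unfold pvG
    rw [if_pos ⟨by omega, hrN, by omega⟩, if_neg (by omega), if_pos ⟨rfl, le_refl s⟩]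
  have hv2 : pvGetA dpP ((r - 1 : ℕ) : Int) ((s + 1 : ℕ) : Int) = pvC (r - 1) (s + 1) % 1000000007 := by
    rw [hP.2.2 (r - 1) (s + 1)]
    unfold pvG
    rw [if_pos ⟨by omega, by omega, hsK⟩, if_pos (by omega)]
  rw [hv1, hv2]
  by_cases hge : r ≤ s + 1
  · rw [if_pos (by omega : ((s + 1 : ℕ) : Int) ≥ (r : Int))]
    rw [show ((s + 1 : ℕ) : Int) - (r : Int) = ((s + 1 - r : ℕ) : Int) from by omega]
    have hv3 : pvGetA dpP ((r - 1 : ℕ) : Int) ((s + 1 - r : ℕ) : Int) = pvC (r - 1) (s + 1 - r) % 1000000007 := by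
      rw [hP.2.2 (r - 1) (s + 1 - r)]
      unfold pvG
      rw [if_pos ⟨by omega, by omega, by omega⟩, if_pos (by omega)]
    rw [hv3]
    have hval : PySem.Int.mod ((pvC r s % 1000000007 + pvC (r - 1) (s + 1) % 1000000007 -
        pvC (r - 1) (s + 1 - r) % 1000000007) + 1000000007) 1000000007 = pvC r (s + 1) % 1000000007 := by
      rw [PySem.Int.mod_eq_emod_of_pos (by norm_num)]
      have hrec := pvC_rec r (s + 1) (by omega) (by omega)
      rw [if_pos hge] at hrec
      simp only [Nat.add_sub_cancel] at hrec
      omega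
    rw [hval]
    refine pvSt_congr (pvSt_set hP r (s + 1) hrN hsK _) ?_
    intro i j
    by_cases hij : i = r ∧ j = s + 1
    · obtain ⟨rfl, rfl⟩ := hij
      rw [if_pos ⟨rfl, rfl⟩]
      unfold pvG
      rw [if_pos ⟨by omega, hrN, hsK⟩, if_neg (by omega), if_pos ⟨rfl, le_refl _⟩]
    · rw [if_neg hij]
      unfold pvG
      split_ifs <;> first | rfl | omega
  · rw [if_neg (by omega : ¬ ((s + 1 : ℕ) : Int) ≥ (r : Int))]
    have hval : PySem.Int.mod ((pvC r s % 1000000007 + pvC (r - 1) (s + 1) % 1000000007) + 1000000007)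
        1000000007 = pvC r (s + 1) % 1000000007 := by
      rw [PySem.Int.mod_eq_emod_of_pos (by norm_num)]
      have hrec := pvC_rec r (s + 1) (by omega) (by omega)
      rw [if_neg hge] at hrec
      simp only [Nat.add_sub_cancel] at hrec
      omega
    rw [hval]
    refine pvSt_congr (pvSt_set hP r (s + 1) hrN hsK _) ?_
    intro i j
    by_cases hij : i = r ∧ j = s + 1
    · obtain ⟨rfl, rfl⟩ := hij
      rw [if_pos ⟨rfl, rfl⟩]
      unfold pvG
      rw [if_pos ⟨by omega, hrN, hsK⟩, if_neg (by omega), if_pos ⟨rfl, le_refl _⟩]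
    · rw [if_neg hij]
      unfold pvG
      split_ifs <;> first | rfl | omega

theorem A_row (N K r : ℕ) (h3 : 3 ≤ r) (hrN : r ≤ N) (dp : List (List Int))
    (h : pvSt N K (pvF4 N K (r - 1)) dp) :
    pvSt N K (pvF4 N K r)
      ((PySem.List.pyRange 1 (min (K : Int) (PySem.Int.floordiv ((r : Int) * ((r : Int) - 1)) 2) + 1) 1).foldl
        (fun dp j =>
          let v := pvGetA dp (r : Int) (j - 1) + pvGetA dp ((r : Int) - 1) j
          let v := if j ≥ (r : Int) then v - pvGetA dp ((r : Int) - 1) (j - (r : Int)) else v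
          pvSetA dp (r : Int) j (PySem.Int.mod (v + 1000000007) 1000000007)) dp) := by
  have hrr : 2 * (r * (r - 1) / 2) = r * (r - 1) := by
    rcases r with _ | m
    · omega
    · have e : (m + 1) * (m + 1 - 1) = (m + 1) * m := by simp
      have e2 : (m + 1) * m = m * (m + 1) := by ring
      obtain ⟨w, hw⟩ := Nat.even_mul_succ_self m
      omega
  have hm : min (K : Int) (PySem.Int.floordiv ((r : Int) * ((r : Int) - 1)) 2)
      = ((min K (r * (r - 1) / 2) : ℕ) : Int) := by
    rw [show (r : Int) * ((r : Int) - 1) = ((r * (r - 1) : ℕ) : Int) from by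
          push_cast [Nat.cast_sub (by omega : 1 ≤ r)]; ring]
    rw [show (2 : Int) = ((2 : ℕ) : Int) from rfl, PySem.Int.floordiv_natCast]
    exact (Nat.cast_min K (r * (r - 1) / 2)).symm
  rw [hm]
  have main : ∀ s : ℕ, s ≤ min K (r * (r - 1) / 2) →
      pvSt N K (pvG N K r s)
        ((PySem.List.pyRange 1 ((s : Int) + 1) 1).foldl
          (fun dp j =>
            let v := pvGetA dp (r : Int) (j - 1) + pvGetA dp ((r : Int) - 1) j
            let v := if j ≥ (r : Int) then v - pvGetA dp ((r : Int) - 1) (j - (r : Int)) else v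
            pvSetA dp (r : Int) j (PySem.Int.mod (v + 1000000007) 1000000007)) dp) := by
    intro s; induction s with
    | zero =>
      intro _
      simp only [Nat.cast_zero]
      rw [PySem.List.pyRange_one_eq_nil (a := 1) (b := (0 : Int) + 1) (by omega)]
      simp only [List.foldl_nil]
      refine pvSt_congr h ?_
      intro i j
      unfold pvF4 pvG
      by_cases hA : 1 ≤ i ∧ i ≤ N ∧ j ≤ K
      · rw [if_pos hA, if_pos hA]
        by_cases hlt : i < r
        · rw [if_pos (by omega : i ≤ r - 1), if_pos hlt]
        · rw [if_neg (by omega : ¬ i ≤ r - 1), if_neg hlt]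
          by_cases hj : i = r ∧ j ≤ 0
          · rw [if_pos hj, show j = 0 from by omega]
            unfold pvBase
            rw [pvC_zero_right, if_pos rfl]
            decide
          · rw [if_neg hj]
      · rw [if_neg hA, if_neg hA]
    | succ s ih =>
      intro hs
      rw [show (((s + 1 : ℕ) : Int) + 1) = ((((s : ℕ) : Int) + 1) + 1) from by push_cast; ring]
      rw [PySem.List.pyRange_one_succ_right (a := 1) (b := ((s : ℕ) : Int) + 1) (by omega),
          List.foldl_append]
      simp only [List.foldl_cons, List.foldl_nil]
      exact A_row_step N K r s h3 hrN (by omega) _ (ih (by omega))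
  refine pvSt_congr (main (min K (r * (r - 1) / 2)) le_rfl) ?_
  intro i j
  unfold pvF4 pvG
  by_cases hA : 1 ≤ i ∧ i ≤ N ∧ j ≤ K
  · rw [if_pos hA, if_pos hA]
    by_cases hlt : i < r
    · rw [if_pos hlt, if_pos (by omega : i ≤ r)]
    · by_cases hir : i = r
      · by_cases hjm : j ≤ min K (r * (r - 1) / 2)
        · rw [if_neg hlt, if_pos ⟨hir, hjm⟩, if_pos (by omega : i ≤ r), hir]
        · rw [if_neg hlt, if_neg (by tauto), if_pos (by omega : i ≤ r), hir,
              pvC_eq_zero r j (by omega)]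
          unfold pvBase
          rw [if_neg (by omega : ¬ j = 0)]
          decide
      · rw [if_neg hlt, if_neg (by tauto), if_neg (by omega : ¬ i ≤ r)]
  · rw [if_neg hA, if_neg hA]

theorem A_outer (N K : ℕ) (dp2 : List (List Int)) (h2 : pvSt N K (pvF4 N K 2) dp2) :
    ∀ t : ℕ, 2 ≤ t → t ≤ N →
    pvSt N K (pvF4 N K t)
      ((PySem.List.pyRange 3 ((t : Int) + 1) 1).foldl (fun dp i =>
        (PySem.List.pyRange 1 (min (K : Int) (PySem.Int.floordiv (i * (i - 1)) 2) + 1) 1).foldl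
          (fun dp j =>
            let v := pvGetA dp i (j - 1) + pvGetA dp (i - 1) j
            let v := if j ≥ i then v - pvGetA dp (i - 1) (j - i) else v
            pvSetA dp i j (PySem.Int.mod (v + 1000000007) 1000000007)) dp) dp2) := by
  intro t; induction t with
  | zero => omega
  | succ t ih =>
    intro h2t htN
    rcases Nat.lt_or_ge t 2 with ht2 | ht2
    · obtain rfl : t = 1 := by omega
      rw [PySem.List.pyRange_one_eq_nil (a := 3) (b := ((1 + 1 : ℕ) : Int) + 1) (by omega)]
      simpa using h2
    · rw [show (((t + 1 : ℕ) : Int) + 1) = ((((t : ℕ) : Int) + 1) + 1) from by push_cast; ring]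
      rw [PySem.List.pyRange_one_succ_right (a := 3) (b := ((t : ℕ) : Int) + 1) (by omega),
          List.foldl_append]
      simp only [List.foldl_cons, List.foldl_nil]
      exact A_row N K (t + 1) (by omega) (by omega) _ (ih ht2 (by omega))

theorem A_val (n k : Int) (hn : 0 ≤ n) (hk1 : 1 ≤ k)
    (hkm : k < PySem.Int.floordiv (n * (n - 1)) 2) :
    kInversePairs n k = pvC n.toNat k.toNat % 1000000007 := by
  have hM2 := pv_two_mul_floordiv n
  obtain ⟨N, rfl⟩ := Int.eq_ofNat_of_zero_le hn
  obtain ⟨K, rfl⟩ := Int.eq_ofNat_of_zero_le (by omega : (0 : Int) ≤ k)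
  have hNN : ((N : Int)) * ((N : Int) - 1) = ((N * (N - 1) : ℕ) : Int) := by
    rcases N with _ | m
    · simp
    · push_cast [Nat.cast_sub (by omega : 1 ≤ m + 1)]; ring
  rw [hNN] at hkm hM2
  rw [show ((2 : Int)) = ((2 : ℕ) : Int) from rfl, PySem.Int.floordiv_natCast] at hkm hM2
  have hK1 : 1 ≤ K := by omega
  have h2K : 2 * K < N * (N - 1) := by omega
  have hN3 : 3 ≤ N := by
    rcases N with _ | _ | _ | m <;> omega
  simp only [kInversePairs]
  rw [hNN, show ((2 : Int)) = ((2 : ℕ) : Int) from rfl, PySem.Int.floordiv_natCast]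
  rw [if_neg (by omega : ¬ ((K : Int) > ((N * (N - 1) / 2 : ℕ) : Int)))]
  rw [if_neg (by
    rintro (h | h)
    · omega
    · omega)]
  have h0 := A_init N K
  have h2' := A_stage2 N K _ h0 N le_rfl
  have h3' := pvSt_set h2' 2 1 (by omega) (by omega) 1
  push_cast at h3'
  have h4 := pvSt_congr h3' (G := pvF4 N K 2) ?_
  · have h5 := A_outer N K _ h4 N (by omega) le_rfl
    have h6 := h5.2.2 N K
    simp only [Int.toNat_natCast]
    rw [show pvF4 N K N N K = pvC N K % 1000000007 from by
      unfold pvF4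
      rw [if_pos ⟨by omega, le_rfl, le_rfl⟩, if_pos le_rfl]] at h6
    rw [← h6]
    rfl
  · intro i j
    unfold pvF4 pvBase
    by_cases hA : 1 ≤ i ∧ i ≤ N ∧ j ≤ K
    · rw [if_pos hA]
      by_cases hij : i = 2 ∧ j = 1
      · obtain ⟨rfl, rfl⟩ := hij
        rw [if_pos ⟨rfl, rfl⟩, if_pos (by omega : (2 : ℕ) ≤ 2), pvC_two]
        norm_num
      · rw [if_neg hij]
        by_cases hj0 : 1 ≤ i ∧ i ≤ N ∧ j = 0
        · rw [if_pos hj0, show j = 0 from hj0.2.2]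
          by_cases hi2 : i ≤ 2
          · rw [if_pos hi2, pvC_zero_right]; decide
          · rw [if_neg hi2, if_pos rfl]
        · rw [if_neg hj0]
          have hj1 : 1 ≤ j := by omega
          by_cases hi2 : i ≤ 2
          · rw [if_pos hi2]
            rcases i with _ | _ | _ | m
            · omega
            · rw [pvC_one, if_neg (by omega : ¬ j = 0)]; decide
            · rw [pvC_two, if_neg (by omega : ¬ (j = 0 ∨ j = 1))]; decide
            · omega
          · rw [if_neg hi2, if_neg (by omega : ¬ j = 0)]
    · rw [if_neg hA]
      split_ifs <;> first | rfl | omega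

-- ===== VERDICT (by name: the statement is the Claim_ definition above) =====
theorem kInversePairs_spec : Claim_unchanged_kInversePairs := by
  intro n k _ hpre
  unfold Spec_kInversePairs
  intro hnd
  obtain ⟨hk, hdisj⟩ := hpre
  rcases Int.lt_or_le n 0 with hn | hn
  · have hf1 := pv_maxInv_pos n hn
    rw [B_neg n k hn hk]
    have hM2 := pv_two_mul_floordiv n
    have hne : k ≠ PySem.Int.floordiv (n * (n - 1)) 2 := by
      intro h; exact hnd ⟨hn, by omega⟩
    rcases hdisj with h | h | h
    · omega
    · subst h
      simp only [kInversePairs]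
      rw [if_neg (by omega)]
      simp
    · simp only [kInversePairs]
      rw [if_pos (by omega), if_neg (by omega)]
  · obtain ⟨N, rfl⟩ := Int.eq_ofNat_of_zero_le hn
    obtain ⟨K, rfl⟩ := Int.eq_ofNat_of_zero_le hk
    rw [B_val _ _ hn hk]
    simp only [Int.toNat_natCast]
    have hNN : ((N : Int)) * ((N : Int) - 1) = ((N * (N - 1) : ℕ) : Int) := by
      rcases N with _ | m
      · simp
      · push_cast [Nat.cast_sub (by omega : 1 ≤ m + 1)]; ring
    by_cases hgt : N * (N - 1) / 2 < K
    · simp only [kInversePairs]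
      rw [hNN, show ((2 : Int)) = ((2 : ℕ) : Int) from rfl, PySem.Int.floordiv_natCast]
      rw [if_pos (by omega), pvC_eq_zero N K (by omega)]
      decide
    · by_cases hk0 : K = 0
      · simp only [kInversePairs]
        rw [hNN, show ((2 : Int)) = ((2 : ℕ) : Int) from rfl, PySem.Int.floordiv_natCast]
        rw [if_neg (by omega), if_pos (Or.inl (by omega : ((K : ℕ) : Int) = 0))]
        rw [hk0, pvC_zero_right]
        decide
      · by_cases hkmax : K = N * (N - 1) / 2
        · simp only [kInversePairs]
          rw [hNN, show ((2 : Int)) = ((2 : ℕ) : Int) from rfl, PySem.Int.floordiv_natCast]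
          rw [if_neg (by omega), if_pos (Or.inr (by omega : ((K : ℕ) : Int) = ((N * (N - 1) / 2 : ℕ) : Int)))]
          rw [hkmax, pvC_max]
          decide
        · have := A_val ((N : ℕ) : Int) ((K : ℕ) : Int) hn (by omega) (by
            rw [hNN, show ((2 : Int)) = ((2 : ℕ) : Int) from rfl, PySem.Int.floordiv_natCast]
            omega)
          simpa using this

theorem kInversePairs_changed : Claim_changed_kInversePairs := by
  unfold Claim_changed_kInversePairs; decide

theorem kInversePairs_tight : Claim_exact_kInversePairs := by
  intro n k _ hpre hD
  obtain ⟨hn, hkf⟩ := hD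
  have hf1 := pv_maxInv_pos n hn
  rw [B_neg n k hn hpre.1]
  simp only [kInversePairs]
  have hM2 := pv_two_mul_floordiv n
  have hkf' : k = PySem.Int.floordiv (n * (n - 1)) 2 := by omega
  rw [if_neg (by omega), if_pos (Or.inr hkf'), if_neg (by omega : ¬ k = 0)]
  decide
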